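-- pv_equiv track=rewrite | github.com/AnitaGB/CaeserCypherPy | cifraDeCesar.py | gerar_alfabeto_cifrado
-- ===== SOURCE A (Python) =====
-- alfabeto = ['a', 'b', 'c', 'd', 'e', 'f', 'g', 'h',
--             'i', 'j', 'k', 'l', 'm', 'n', 'o', 'p',
--             'q', 'r', 's', 't', 'u', 'v', 'w', 'x',
--             'y', 'z']
--
-- def gerar_alfabeto_cifrado(chave):
--     novo_alfabeto = {}
--
--     for letra in alfabeto:
--
--         # Recupera o índice da letra
--         indice = alfabeto.index(letra)
--         # Limita que o novo indice esteja nos limites de tamanho do alfabeto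
--         novo_indice = (indice + chave) % len(alfabeto)
--         nova_letra = alfabeto[novo_indice]
--         novo_alfabeto[letra] = nova_letra
--
--     return novo_alfabeto
-- ===== SOURCE B (Python) =====
-- alfabeto = ['a', 'b', 'c', 'd', 'e', 'f', 'g', 'h',
--             'i', 'j', 'k', 'l', 'm', 'n', 'o', 'p',
--             'q', 'r', 's', 't', 'u', 'v', 'w', 'x',
--             'y', 'z']
--
-- def gerar_alfabeto_cifrado(chave):
--     shift = chave % 26
--     rotated = alfabeto[shift:] + alfabeto[:shift]
--     return dict(zip(alfabeto, rotated))
-- ===== Notes on version B (the rewrite author's own statement) =====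
-- stated objective: idiomatic
-- what changed: B replaces A's per-letter alfabeto.index lookup and per-letter modular index arithmetic with a single normalized shift (chave % 26), one rotated slice alfabeto[shift:]+alfabeto[:shift], and dict(zip(alfabeto, rotated)).
import Mathlib
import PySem

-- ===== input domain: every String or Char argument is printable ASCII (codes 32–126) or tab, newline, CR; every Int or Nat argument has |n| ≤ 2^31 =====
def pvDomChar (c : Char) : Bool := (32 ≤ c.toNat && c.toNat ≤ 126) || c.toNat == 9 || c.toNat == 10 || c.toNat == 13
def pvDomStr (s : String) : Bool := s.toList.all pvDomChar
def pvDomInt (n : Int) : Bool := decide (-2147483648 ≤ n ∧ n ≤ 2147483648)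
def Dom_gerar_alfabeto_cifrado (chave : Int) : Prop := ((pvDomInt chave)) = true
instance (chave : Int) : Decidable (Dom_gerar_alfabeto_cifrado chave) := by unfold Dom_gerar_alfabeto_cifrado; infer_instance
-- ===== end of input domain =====

-- B replaces A's per-letter index lookup and modular shift with one rotated slice zipped against the alphabet (idiomatic decomposition).


-- ===== PORT A =====
def pvAlfabeto : List String :=
  ["a", "b", "c", "d", "e", "f", "g", "h",
   "i", "j", "k", "l", "m", "n", "o", "p",
   "q", "r", "s", "t", "u", "v", "w", "x",
   "y", "z"]

-- alfabeto.index(letra) always succeeds and alfabeto[novo_indice] is always in range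
-- (0 ≤ novo_indice < 26), so the .getD defaults are never used.
def gerar_alfabeto_cifrado (chave : Int) : List (String × String) :=
  (pvAlfabeto.foldl (fun novo_alfabeto letra =>
      let indice : Int := ((PySem.List.index? pvAlfabeto letra).getD 0 : Nat)
      let novo_indice := PySem.Int.mod (indice + chave) (pvAlfabeto.length : Int)
      let nova_letra := (PySem.List.pyGet? pvAlfabeto novo_indice).getD ""
      novo_alfabeto.insert letra nova_letra)
    (PySem.Dict.empty : PySem.Dict String String)).items

-- ===== PORT B =====
def gerar_alfabeto_cifrado_alt (chave : Int) : List (String × String) :=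
  let shift := PySem.Int.mod chave 26
  let rotated := PySem.List.slice pvAlfabeto (some shift) none ++
                 PySem.List.slice pvAlfabeto none (some shift)
  (PySem.Dict.ofList (pvAlfabeto.zip rotated)).items

-- ===== PRECONDITION & SPEC =====
def Spec_gerar_alfabeto_cifrado (chave : Int) (out : List (String × String)) : Prop := out = gerar_alfabeto_cifrado_alt chave
instance (chave : Int) (out : List (String × String)) : Decidable (Spec_gerar_alfabeto_cifrado chave out) := by unfold Spec_gerar_alfabeto_cifrado; infer_instance

-- ===== CLAIM (what is proved, stated in full; the proofs are below) =====
def Claim_equal_gerar_alfabeto_cifrado : Prop := ∀ (chave : Int), Dom_gerar_alfabeto_cifrado chave → Spec_gerar_alfabeto_cifrado chave (gerar_alfabeto_cifrado chave)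

-- ===== LEMMAS AND PROOFS =====

-- Both ports depend on chave only through chave % 26.
theorem pv_key (chave : Int) :
    gerar_alfabeto_cifrado chave = gerar_alfabeto_cifrado_alt chave := by
  have h26 : (0:Int) < 26 := by norm_num
  obtain ⟨r, hr⟩ : ∃ r, chave % 26 = r := ⟨_, rfl⟩
  have hb : 0 ≤ r := hr ▸ Int.emod_nonneg _ (by norm_num)
  have hlt : r < 26 := hr ▸ Int.emod_lt_of_pos _ h26
  have hmod : PySem.Int.mod chave 26 = r := by
    rw [PySem.Int.mod_eq_emod_of_pos h26, hr]
  have hshift : ∀ k : Int, PySem.Int.mod (k + chave) 26 = PySem.Int.mod (k + r) 26 := by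
    intro k
    rw [PySem.Int.mod_eq_emod_of_pos h26, PySem.Int.mod_eq_emod_of_pos h26]
    omega
  lift r to ℕ using hb with n
  have hn : n < 26 := by exact_mod_cast hlt
  have hlen : ((pvAlfabeto.length : Nat) : Int) = 26 := by decide
  interval_cases n <;>
    · simp only [gerar_alfabeto_cifrado, gerar_alfabeto_cifrado_alt, hlen, hshift, hmod]
      decide

-- ===== VERDICT (by name: the statement is the Claim_ definition above) =====
theorem gerar_alfabeto_cifrado_spec : Claim_equal_gerar_alfabeto_cifrado := by
  intro chave _
  exact pv_key chave
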